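-- pv_equiv track=rewrite | github.com/crisleymarques/analise-tecnica-algoritmos | lista-1/q2.py | trocaElementos
-- ===== SOURCE A (Python) =====
-- def trocaElementos(arr1, arr2):
--     soma1 = sum(arr1)
--     soma2 = sum(arr2)
--     resultado = []
--
--     for i in range(len(arr1)):
--       for j in range(len(arr2)):
--         if soma1 - arr1[i] + arr2[j] == soma2 - arr2[j] + arr1[i]:
--           resultado.append(arr1[i])
--           resultado.append(arr2[j])
--           return resultado
--     return []
-- ===== SOURCE B (Python) =====
-- def trocaElementos(arr1, arr2):
--     diff = sum(arr2) - sum(arr1)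
--     if diff % 2 != 0:
--         return []
--     half = diff // 2
--     values2 = set(arr2)
--     for a in arr1:
--         if a + half in values2:
--             return [a, a + half]
--     return []
-- ===== Notes on version B (the rewrite author's own statement) =====
-- stated objective: faster
-- what changed: Replaces the nested O(n*m) scan with a parity check, a set of arr2's values built once, and a single pass over arr1 looking up the required complement a + (s2-s1)/2.
import Mathlib
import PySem

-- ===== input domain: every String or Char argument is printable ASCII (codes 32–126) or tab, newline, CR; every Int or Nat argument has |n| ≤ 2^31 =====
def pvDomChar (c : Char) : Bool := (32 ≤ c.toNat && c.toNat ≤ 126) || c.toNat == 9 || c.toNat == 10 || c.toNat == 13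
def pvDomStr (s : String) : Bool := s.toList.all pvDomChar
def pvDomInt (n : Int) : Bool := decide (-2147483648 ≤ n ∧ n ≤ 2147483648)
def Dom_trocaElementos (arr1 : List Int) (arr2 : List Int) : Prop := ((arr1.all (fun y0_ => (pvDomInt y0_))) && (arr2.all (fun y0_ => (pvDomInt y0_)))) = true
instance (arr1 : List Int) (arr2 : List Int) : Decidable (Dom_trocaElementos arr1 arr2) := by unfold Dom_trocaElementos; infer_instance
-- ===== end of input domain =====

-- B replaces A's nested scan by a parity check on s2-s1 plus a one-pass complement lookup in a set of arr2 (asymptotically faster in a timing run).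

-- ===== PORT A =====
-- inner 'for j' loop of A: first arr2 element satisfying the balance equation
def innerA (soma1 soma2 a : Int) : List Int → Option Int
  | [] => none
  | b :: rest =>
      if soma1 - a + b = soma2 - b + a then some b else innerA soma1 soma2 a rest

-- outer 'for i' loop of A with its early return
def outerA (soma1 soma2 : Int) (arr2 : List Int) : List Int → List Int
  | [] => []
  | a :: rest =>
      match innerA soma1 soma2 a arr2 with
      | some b => [a, b]
      | none => outerA soma1 soma2 arr2 rest

def trocaElementos (arr1 : List Int) (arr2 : List Int) : List Int :=
  let soma1 := arr1.sum
  let soma2 := arr2.sum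
  outerA soma1 soma2 arr2 arr1

-- ===== PORT B =====
-- B's single pass over arr1 with its early return
def altLoop (half : Int) (values2 : PySem.Set Int) : List Int → List Int
  | [] => []
  | a :: rest =>
      if PySem.Set.contains values2 (a + half) then [a, a + half]
      else altLoop half values2 rest

def trocaElementos_alt (arr1 : List Int) (arr2 : List Int) : List Int :=
  let diff := arr2.sum - arr1.sum
  if PySem.Int.mod diff 2 ≠ 0 then []
  else
    let half := PySem.Int.floordiv diff 2
    let values2 := PySem.Set.ofList arr2
    altLoop half values2 arr1

-- ===== PRECONDITION & SPEC =====
def Spec_trocaElementos (arr1 : List Int) (arr2 : List Int) (out : List Int) : Prop := out = trocaElementos_alt arr1 arr2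
instance (arr1 : List Int) (arr2 : List Int) (out : List Int) : Decidable (Spec_trocaElementos arr1 arr2 out) := by unfold Spec_trocaElementos; infer_instance

-- ===== CLAIM (what is proved, stated in full; the proofs are below) =====
def Claim_equal_trocaElementos : Prop := ∀ (arr1 : List Int) (arr2 : List Int), Dom_trocaElementos arr1 arr2 → Spec_trocaElementos arr1 arr2 (trocaElementos arr1 arr2)

-- ===== LEMMAS AND PROOFS =====

-- if diff = soma2 - soma1 is odd, A's inner condition can never hold
theorem innerA_none_of_odd (soma1 soma2 a : Int) (l : List Int)
    (h : ¬ (2 ∣ (soma2 - soma1))) : innerA soma1 soma2 a l = none := by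
  induction l with
  | nil => rfl
  | cons b rest ih =>
      simp only [innerA]
      rw [if_neg, ih]
      intro hc
      exact h ⟨b - a, by omega⟩

-- if diff = 2*half, A's inner loop returns some (a+half) iff a+half ∈ l
theorem innerA_of_even (soma1 soma2 a half : Int) (l : List Int)
    (h : soma2 - soma1 = 2 * half) :
    innerA soma1 soma2 a l = if (a + half) ∈ l then some (a + half) else none := by
  induction l with
  | nil => rfl
  | cons b rest ih =>
      simp only [innerA, ih, List.mem_cons]
      by_cases hb : b = a + half
      · subst hb
        rw [if_pos (by omega), if_pos (Or.inl rfl)]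
      · rw [if_neg (by omega)]
        by_cases hm : (a + half) ∈ rest
        · rw [if_pos hm, if_pos (Or.inr hm)]
        · rw [if_neg hm, if_neg (by tauto)]

theorem outerA_eq_altLoop (soma1 soma2 half : Int) (arr2 l : List Int)
    (h : soma2 - soma1 = 2 * half) :
    outerA soma1 soma2 arr2 l = altLoop half (PySem.Set.ofList arr2) l := by
  induction l with
  | nil => rfl
  | cons a rest ih =>
      simp only [outerA, altLoop, innerA_of_even soma1 soma2 a half arr2 h,
        PySem.Set.contains_eq_listContains]
      by_cases hm : (a + half) ∈ arr2
      · simp [hm]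
      · simp [hm, ih]

theorem outerA_nil_of_odd (soma1 soma2 : Int) (arr2 l : List Int)
    (h : ¬ (2 ∣ (soma2 - soma1))) : outerA soma1 soma2 arr2 l = [] := by
  induction l with
  | nil => rfl
  | cons a rest ih => simp only [outerA, innerA_none_of_odd _ _ _ _ h, ih]

-- ===== VERDICT (by name: the statement is the Claim_ definition above) =====
theorem trocaElementos_spec : Claim_equal_trocaElementos := by
  intro arr1 arr2 _
  unfold Spec_trocaElementos trocaElementos trocaElementos_alt
  by_cases hdvd : (2 : Int) ∣ (arr2.sum - arr1.sum)
  · rw [if_neg (by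
      simp only [ne_eq, not_not]
      exact (PySem.Int.mod_eq_zero_iff_dvd _ _).mpr hdvd)]
    obtain ⟨half, hh⟩ := hdvd
    have hf : PySem.Int.floordiv (arr2.sum - arr1.sum) 2 = half := by
      rw [PySem.Int.floordiv_eq_ediv_of_pos (b := 2) (by omega), hh]
      omega
    rw [hf]
    exact outerA_eq_altLoop _ _ _ _ _ hh
  · rw [if_pos (by
      simp only [ne_eq]
      exact fun hc => hdvd ((PySem.Int.mod_eq_zero_iff_dvd _ _).mp hc))]
    exact outerA_nil_of_odd _ _ _ _ hdvd
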